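-- pv_equiv track=rewrite | github.com/lauridsj/CombineHarvester | ahtt/scripts/utilspy.py | index_n1
-- ===== SOURCE A (Python) =====
-- def index_n1(idxn, nbins):
--     '''
--     translate ND list of indices into an 'unrolled' 1D list of indices
--     e.g. 2D -> 1D
--     [
--     0, 0 -> 0
--     0, 1 -> 1
--     1, 0 -> 2
--     1, 1 -> 3
--     ]
--     '''
--     idx1 = idxn[0]
--     for ii in range(1, len(idxn)):
--         multiplier = 1
--         for jj in range(ii - 1, -1, -1):
--             multiplier *= nbins[jj]
--
--         idx1 += idxn[ii] * multiplier
--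
--     return idx1
-- ===== SOURCE B (Python) =====
-- def index_n1(idxn, nbins):
--     '''
--     translate ND list of indices into an 'unrolled' 1D list of indices,
--     keeping a running cumulative product of nbins (single pass, O(n)).
--     '''
--     idx1 = idxn[0]
--     multiplier = 1
--     for ii in range(1, len(idxn)):
--         multiplier *= nbins[ii - 1]
--         idx1 += idxn[ii] * multiplier
--     return idx1
-- ===== Notes on version B (the rewrite author's own statement) =====
-- stated objective: faster
-- what changed: Replaced the inner loop that recomputes the product of nbins[0..ii-1] from scratch at every step with a single running cumulative multiplier updated once per step.
import Mathlib
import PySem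

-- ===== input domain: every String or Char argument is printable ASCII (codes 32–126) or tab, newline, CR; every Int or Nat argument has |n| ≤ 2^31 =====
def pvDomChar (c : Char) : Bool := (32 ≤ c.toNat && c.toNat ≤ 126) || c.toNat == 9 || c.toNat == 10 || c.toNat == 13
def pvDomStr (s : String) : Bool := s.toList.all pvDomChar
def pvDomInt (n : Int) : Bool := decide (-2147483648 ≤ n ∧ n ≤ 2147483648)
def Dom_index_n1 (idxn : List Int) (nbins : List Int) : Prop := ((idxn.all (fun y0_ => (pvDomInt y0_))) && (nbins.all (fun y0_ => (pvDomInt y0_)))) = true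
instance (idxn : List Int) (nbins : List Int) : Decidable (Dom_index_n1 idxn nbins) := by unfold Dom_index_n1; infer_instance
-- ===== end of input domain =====

-- B replaces A's inner loop (recomputing prod(nbins[0..ii-1]) from scratch each step, O(n^2))
-- with a running cumulative multiplier (single pass, O(n)); objective: faster (asymptotic).

-- ===== PORT A =====
-- A's inner loop: for jj in range(ii-1, -1, -1): multiplier *= nbins[jj]
def pvProdDown (nbins : List Int) (ii : Int) : Int :=
  (PySem.List.pyRange (ii - 1) (-1) (-1)).foldl
    (fun m jj => m * PySem.List.pyGetD nbins jj 0) 1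

-- one iteration of A's outer loop body
def pvStepA (idxn nbins : List Int) (idx1 ii : Int) : Int :=
  idx1 + PySem.List.pyGetD idxn ii 0 * pvProdDown nbins ii

def index_n1 (idxn : List Int) (nbins : List Int) : Int :=
  (PySem.List.pyRange 1 idxn.length 1).foldl (pvStepA idxn nbins)
    (PySem.List.pyGetD idxn 0 0)

-- ===== PORT B =====
-- one iteration of B's loop body: state = (idx1, running multiplier)
def pvStepB (idxn nbins : List Int) (p : Int × Int) (ii : Int) : Int × Int :=
  let multiplier := p.2 * PySem.List.pyGetD nbins (ii - 1) 0
  (p.1 + PySem.List.pyGetD idxn ii 0 * multiplier, multiplier)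

def index_n1_alt (idxn : List Int) (nbins : List Int) : Int :=
  ((PySem.List.pyRange 1 idxn.length 1).foldl (pvStepB idxn nbins)
    (PySem.List.pyGetD idxn 0 0, 1)).1

-- ===== PRECONDITION & SPEC =====
-- Pre_ excludes exactly the inputs where the Python raises IndexError:
-- empty idxn (idxn[0]) or nbins shorter than len(idxn)-1 (nbins[jj] in the inner loop).
def Pre_index_n1 (idxn : List Int) (nbins : List Int) : Prop :=
  idxn ≠ [] ∧ (idxn.length : Int) ≤ (nbins.length : Int) + 1
instance (idxn : List Int) (nbins : List Int) : Decidable (Pre_index_n1 idxn nbins) := by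
  unfold Pre_index_n1; infer_instance

def pvWitness_index_n1 : List Int × List Int := ([1, 0, 2], [3, 4, 5])

def Spec_index_n1 (idxn : List Int) (nbins : List Int) (out : Int) : Prop := out = index_n1_alt idxn nbins
instance (idxn : List Int) (nbins : List Int) (out : Int) : Decidable (Spec_index_n1 idxn nbins out) := by unfold Spec_index_n1; infer_instance

-- ===== CLAIM (what is proved, stated in full; the proofs are below) =====
def Claim_equal_index_n1 : Prop := ∀ (idxn : List Int) (nbins : List Int), Dom_index_n1 idxn nbins → Pre_index_n1 idxn nbins → Spec_index_n1 idxn nbins (index_n1 idxn nbins)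

-- ===== LEMMAS AND PROOFS =====

-- pulling the init out of a product fold
theorem pv_foldl_mul_init (g : Int → Int) (l : List Int) (m : Int) :
    l.foldl (fun m jj => m * g jj) m = m * l.foldl (fun m jj => m * g jj) 1 := by
  induction l generalizing m with
  | nil => simp
  | cons x xs ih =>
      simp only [List.foldl_cons]
      rw [ih (m * g x), ih (1 * g x)]
      ring

theorem pvProdDown_zero (nbins : List Int) : pvProdDown nbins 0 = 1 := by
  unfold pvProdDown
  rw [PySem.List.pyRange_neg_one_eq_nil (by norm_num)]
  rfl

theorem pvProdDown_succ (nbins : List Int) (n : Nat) :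
    pvProdDown nbins ((n : Int) + 1) = pvProdDown nbins n * PySem.List.pyGetD nbins n 0 := by
  unfold pvProdDown
  rw [show ((n : Int) + 1 - 1) = (n : Int) by ring,
      PySem.List.pyRange_neg_one_cons (by omega)]
  simp only [List.foldl_cons, one_mul]
  rw [pv_foldl_mul_init]
  ring

-- the loop invariant: B's pair fold carries A's accumulator plus the running product
theorem pv_loop (idxn nbins : List Int) (n : Nat) (x0 : Int) :
    (PySem.List.pyRange 1 ((n : Int) + 1) 1).foldl (pvStepB idxn nbins) (x0, 1)
      = ((PySem.List.pyRange 1 ((n : Int) + 1) 1).foldl (pvStepA idxn nbins) x0,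
         pvProdDown nbins n) := by
  induction n with
  | zero =>
      rw [show ((0 : Nat) : Int) + 1 = 1 by norm_num,
          PySem.List.pyRange_one_eq_nil (le_refl 1)]
      simp [pvProdDown_zero]
  | succ k ih =>
      rw [show ((k + 1 : Nat) : Int) + 1 = ((k : Int) + 1) + 1 by push_cast; ring,
          PySem.List.pyRange_one_succ_right (by omega)]
      simp only [List.foldl_append, List.foldl_cons, List.foldl_nil, ih]
      unfold pvStepA pvStepB
      simp only [show ((k : Int) + 1 - 1) = (k : Int) by ring, pvProdDown_succ,
        show (((k + 1 : Nat)) : Int) = (k : Int) + 1 by push_cast; ring]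

-- ===== VERDICT (by name: the statement is the Claim_ definition above) =====
theorem index_n1_spec : Claim_equal_index_n1 := by
  intro idxn nbins _ _
  unfold Spec_index_n1 index_n1 index_n1_alt
  cases idxn with
  | nil =>
      simp [PySem.List.pyRange_one_eq_nil]
  | cons x xs =>
      rw [show ((List.length (x :: xs) : Int)) = ((xs.length : Int) + 1) by
            push_cast [List.length_cons]; ring,
          pv_loop]
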